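-- pv_equiv track=rewrite | github.com/diegoami/DA_Hellofresh | find_with_chili.py | has_chili
-- ===== SOURCE A (Python) =====
-- def has_chili(tok_ings):
--     def one_change(first, second):
--         if first == second:
--             return True
--         if len(first) == len(second):
--             count = 0
--             for i in range(len(first)):
--                 if first[i] != second[i]:
--                     count += 1
--                     if count > 1:
--                         return False
--             return True
--         if len(second) > len(first):
--             first, second = second, first
--         gap = 0
--         if (len(first) == len(second)+1):
--             for i in range(len(second)):
--                 if first[i+gap] != second[i]:
--                    gap += 1
--                    if (gap > 1):
--                        return False
--             return True
--         return False
--     for tok in tok_ings: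
--         if (one_change(tok, "chili") or one_change(tok, "chilies") ):
--             return True
--     return False
-- ===== SOURCE B (Python) =====
-- def has_chili(tok_ings):
--     def within1(a, b):
--         # true iff Levenshtein(a, b) <= 1
--         la, lb = len(a), len(b)
--         if la == lb:
--             return sum(x != y for x, y in zip(a, b)) <= 1
--         if abs(la - lb) != 1:
--             return False
--         if la < lb:
--             a, b = b, a  # a is the longer string
--         p = 0
--         while p < len(b) and a[p] == b[p]:
--             p += 1
--         return a[p + 1:] == b[p:]
--     return any(within1(tok, "chili") or within1(tok, "chilies") for tok in tok_ings)
-- ===== Notes on version B (the rewrite author's own statement) =====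
-- stated objective: simpler
-- what changed: Replaced the hand-written gap-tracking index loop with a clean edit-distance-1 test: equal lengths -> Hamming count over zip <= 1, lengths differing by 1 -> skip the longest common prefix and compare the rest with one character of the longer string deleted; this also fixes A's bug of never re-checking the position where the gap was spent.
-- intended difference: On lists whose only near-matches are distance-2 tokens of the shape prefix-of-target + two arbitrary chars + later-suffix-of-target (e.g. ['XXhili']), A returns True because its gap loop never compares the skipped position, while B returns False, which is the intended 'edit distance at most 1' behaviour. — e.g. on has_chili(["XXhili"]): A returns true, B returns false
import Mathlib
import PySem

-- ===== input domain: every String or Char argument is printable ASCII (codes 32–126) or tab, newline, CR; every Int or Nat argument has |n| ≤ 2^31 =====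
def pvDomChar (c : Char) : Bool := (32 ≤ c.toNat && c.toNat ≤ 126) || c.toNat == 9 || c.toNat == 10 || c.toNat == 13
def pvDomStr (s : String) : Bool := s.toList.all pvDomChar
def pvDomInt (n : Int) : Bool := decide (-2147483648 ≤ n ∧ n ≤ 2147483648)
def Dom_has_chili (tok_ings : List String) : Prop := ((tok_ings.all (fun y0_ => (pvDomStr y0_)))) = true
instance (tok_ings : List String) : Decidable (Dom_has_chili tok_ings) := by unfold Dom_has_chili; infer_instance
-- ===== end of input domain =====

-- B replaces A's gap-tracking loop with a clean "edit distance ≤ 1" check (Hamming count / longest-common-prefix + delete);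
-- this also fixes A's bug of never re-comparing the position where the gap was spent (see D_has_chili below).

-- ===== PORT A =====
-- the equal-length loop of one_change: count mismatches, early return on count > 1
def oneChangeEqLoop : List Char → List Char → Int → Bool
  | f :: fs, s :: ss, count =>
      if f ≠ s then
        if count + 1 > 1 then false else oneChangeEqLoop fs ss (count + 1)
      else oneChangeEqLoop fs ss count
  | _, _, _ => true

-- the length+1 loop of one_change: on mismatch bump gap (skipping one extra char of first), early return on gap > 1
def oneChangeGapLoop : List Char → List Char → Int → Bool
  | f :: fs, s :: ss, gap =>
      if f ≠ s then
        if gap + 1 > 1 then false else oneChangeGapLoop (fs.drop 1) ss (gap + 1)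
      else oneChangeGapLoop fs ss gap
  | _, _, _ => true

def oneChange (first second : List Char) : Bool :=
  if first = second then true
  else if first.length = second.length then oneChangeEqLoop first second 0
  else
    let p := if second.length > first.length then (second, first) else (first, second)
    if p.1.length = p.2.length + 1 then oneChangeGapLoop p.1 p.2 0
    else false

def has_chili : List String → Bool
  | [] => false
  | tok :: rest =>
      if oneChange tok.toList "chili".toList || oneChange tok.toList "chilies".toList then true
      else has_chili rest

-- ===== PORT B =====
def lcpRest : List Char → List Char → List Char × List Char
  | x :: xs, y :: ys => if x = y then lcpRest xs ys else (x :: xs, y :: ys)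
  | xs, ys => (xs, ys)

def within1 (a b : List Char) : Bool :=
  if a.length = b.length then
    decide ((a.zip b).foldl (fun acc p => acc + (if p.1 ≠ p.2 then 1 else 0)) 0 ≤ 1)
  else if ((a.length : Int) - b.length).natAbs ≠ 1 then false
  else
    let p := if a.length < b.length then (b, a) else (a, b)
    let r := lcpRest p.1 p.2
    decide (r.1.drop 1 = r.2)

def has_chili_alt (tok_ings : List String) : Bool :=
  tok_ings.any (fun tok => within1 tok.toList "chili".toList || within1 tok.toList "chilies".toList)

-- ===== PRECONDITION & SPEC =====
-- closed-form condition on the input (take/drop splits; no port code): cf a b u t says u and t share a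
-- prefix of some length k and agree again after dropping a resp. b further chars (with matching lengths)

-- ===== PRECONDITION & SPEC =====
def tgts : List String := ["chili", "chilies"]

-- closed-form conditions on the input, no port code: bad u t holds when erasing positions k and k+1 of u
-- and position k of t leaves equal lists — the shape A's gap loop wrongly accepts at distance 2;
-- ok1 u t holds exactly when u and t are at edit distance ≤ 1 (delete / insert / substitute at k)
def bad (u t : List Char) : Prop :=
  ∃ k ∈ List.range t.length, (u.eraseIdx k).eraseIdx k = t.eraseIdx k

def ok1 (u t : List Char) : Prop :=
  ∃ k ∈ List.range (u.length + 1), u.eraseIdx k = t ∨ u = t.eraseIdx k ∨ u.eraseIdx k = t.eraseIdx k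

-- On lists whose only near-matches of "chili"/"chilies" are distance-2 tokens of the shape
-- prefix-of-target ++ two arbitrary chars ++ later-suffix-of-target (e.g. ["XXhili"]), A returns True
-- (its gap loop never re-compares the skipped position), B returns False, the intended dist ≤ 1 behaviour.
def D_has_chili (tok_ings : List String) : Prop :=
  (∃ u ∈ tok_ings, ∃ t ∈ tgts, bad u.toList t.toList ∨ bad t.toList u.toList) ∧
  ¬ ∃ u ∈ tok_ings, ∃ t ∈ tgts, ok1 u.toList t.toList

instance (tok_ings : List String) : Decidable (D_has_chili tok_ings) := by
  unfold D_has_chili bad ok1 tgts; infer_instance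

def Spec_has_chili (tok_ings : List String) (out : Bool) : Prop :=
  ¬ D_has_chili tok_ings → out = has_chili_alt tok_ings
instance (tok_ings : List String) (out : Bool) : Decidable (Spec_has_chili tok_ings out) := by
  unfold Spec_has_chili; infer_instance

def pvDiffWitness_has_chili : List String := ["XXhili"]
def pvDiffWitnessOut_has_chili : Bool × Bool := (true, false)

-- ===== CLAIM (what is proved, stated in full; the proofs are below) =====
def Claim_unchanged_has_chili : Prop :=
  ∀ (tok_ings : List String), Dom_has_chili tok_ings → Spec_has_chili tok_ings (has_chili tok_ings)
def Claim_changed_has_chili : Prop :=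
  Dom_has_chili (pvDiffWitness_has_chili) ∧ D_has_chili (pvDiffWitness_has_chili) ∧
  has_chili (pvDiffWitness_has_chili) = pvDiffWitnessOut_has_chili.1 ∧
  has_chili_alt (pvDiffWitness_has_chili) = pvDiffWitnessOut_has_chili.2 ∧
  pvDiffWitnessOut_has_chili.1 ≠ pvDiffWitnessOut_has_chili.2
def Claim_exact_has_chili : Prop :=
  ∀ (tok_ings : List String), Dom_has_chili tok_ings → D_has_chili tok_ings →
    has_chili tok_ings ≠ has_chili_alt tok_ings

-- ===== LEMMAS AND PROOFS =====
-- proof-side characterizations: cf a b u t = "common prefix of length k, then agree after dropping a / b chars";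
-- okd 1 = what A's one_change accepts, okd 0 = edit distance ≤ 1
def cf (a b : Nat) (u t : List Char) : Prop :=
  u.length + b = t.length + a ∧
  ∃ k ∈ List.range (t.length + 1), u.take k = t.take k ∧ u.drop (k + a) = t.drop (k + b)

def okd (d : Nat) (u t : List Char) : Prop := cf 1 1 u t ∨ cf (d + 1) d u t ∨ cf (d + 1) d t u

theorem ham_zero (fs ss : List Char) (h : fs.length = ss.length) :
    (fs.zip ss).countP (fun p => decide (p.1 ≠ p.2)) = 0 ↔ fs = ss := by
  induction fs generalizing ss with
  | nil => cases ss <;> simp_all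
  | cons f fs ih =>
    cases ss with
    | nil => simp at h
    | cons s ss =>
      simp only [List.zip_cons_cons, List.countP_cons, List.length_cons] at *
      by_cases hfs : f = s
      · subst hfs
        rw [if_neg (by simp), Nat.add_zero, ih ss (by omega)]
        simp
      · simp [hfs]

theorem oce_char (fs : List Char) : ∀ ss : List Char,
    (oneChangeEqLoop fs ss 0 = true ↔ (fs.zip ss).countP (fun p => decide (p.1 ≠ p.2)) ≤ 1) ∧
    (oneChangeEqLoop fs ss 1 = true ↔ (fs.zip ss).countP (fun p => decide (p.1 ≠ p.2)) = 0) := by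
  induction fs with
  | nil => intro ss; simp [oneChangeEqLoop]
  | cons f fs ih =>
    intro ss
    cases ss with
    | nil => simp [oneChangeEqLoop]
    | cons s ss =>
      by_cases hfs : f = s
      · simp [oneChangeEqLoop, hfs, (ih ss).1, (ih ss).2]
      · simp [oneChangeEqLoop, hfs, (ih ss).2]

theorem sub_iff (fs : List Char) : ∀ ss : List Char, fs.length = ss.length →
    ((fs.zip ss).countP (fun p => decide (p.1 ≠ p.2)) ≤ 1 ↔
      ∃ k ∈ List.range (ss.length + 1), fs.take k = ss.take k ∧ fs.drop (k + 1) = ss.drop (k + 1)) := by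
  induction fs with
  | nil =>
    intro ss h
    cases ss with
    | nil => simp
    | cons => simp at h
  | cons f fs ih =>
    intro ss h
    cases ss with
    | nil => simp at h
    | cons s ss =>
      have hlen : fs.length = ss.length := by simpa using h
      by_cases hfs : f = s
      · subst hfs
        rw [List.zip_cons_cons, List.countP_cons, if_neg (by simp), Nat.add_zero, ih ss hlen]
        constructor
        · rintro ⟨k, hk, h1, h2⟩
          refine ⟨k + 1, ?_, ?_, ?_⟩
          · simp at hk ⊢; omega
          · simpa using h1
          · simpa using h2
        · rintro ⟨k, hk, h1, h2⟩
          cases k with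
          | zero =>
            have h2' : fs = ss := by simpa using h2
            subst h2'
            exact ⟨fs.length, by simp, rfl, by simp⟩
          | succ j =>
            refine ⟨j, ?_, ?_, ?_⟩
            · simp at hk ⊢; omega
            · simpa using h1
            · simpa using h2
      · rw [List.zip_cons_cons, List.countP_cons, if_pos (by simp [hfs])]
        constructor
        · intro hle
          have h0 := (ham_zero fs ss hlen).mp (by omega)
          exact ⟨0, by simp, by simp, by simpa using h0⟩
        · rintro ⟨k, hk, h1, h2⟩
          cases k with
          | zero =>
            have h2' : fs = ss := by simpa using h2
            have := (ham_zero fs ss hlen).mpr h2'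
            omega
          | succ j =>
            have h1' : f = s ∧ fs.take j = ss.take j := by simpa using h1
            exact absurd h1'.1 hfs

theorem gap1_char (fs : List Char) : ∀ ss : List Char, fs.length = ss.length →
    (oneChangeGapLoop fs ss 1 = true ↔ fs = ss) := by
  induction fs with
  | nil =>
    intro ss h
    cases ss with
    | nil => simp [oneChangeGapLoop]
    | cons => simp at h
  | cons f fs ih =>
    intro ss h
    cases ss with
    | nil => simp at h
    | cons s ss =>
      have hlen : fs.length = ss.length := by simpa using h
      by_cases hfs : f = s
      · simp [oneChangeGapLoop, hfs, ih ss hlen]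
      · simp [oneChangeGapLoop, hfs]

theorem gap0_char (fs : List Char) : ∀ ss : List Char, fs.length = ss.length + 1 →
    (oneChangeGapLoop fs ss 0 = true ↔
      ∃ k ∈ List.range (ss.length + 1), fs.take k = ss.take k ∧ fs.drop (k + 2) = ss.drop (k + 1)) := by
  induction fs with
  | nil => intro ss h; simp at h
  | cons f fs ih =>
    intro ss h
    cases ss with
    | nil =>
      have hfs0 : fs = [] := by simpa using h
      subst hfs0
      simp [oneChangeGapLoop]
    | cons s ss =>
      have hlen : fs.length = ss.length + 1 := by simpa using h
      by_cases hfs : f = s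
      · subst hfs
        rw [show oneChangeGapLoop (f :: fs) (f :: ss) 0 = oneChangeGapLoop fs ss 0 by
              simp [oneChangeGapLoop], ih ss hlen]
        constructor
        · rintro ⟨k, hk, h1, h2⟩
          refine ⟨k + 1, ?_, ?_, ?_⟩
          · simp at hk ⊢; omega
          · simpa using h1
          · simpa using h2
        · rintro ⟨k, hk, h1, h2⟩
          cases k with
          | zero =>
            have h2' : fs.drop 1 = ss := by simpa using h2
            refine ⟨0, by simp, by simp, ?_⟩
            have := congrArg (List.drop 1) h2'
            simpa [List.drop_drop] using this
          | succ j =>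
            refine ⟨j, ?_, ?_, ?_⟩
            · simp at hk ⊢; omega
            · have h1' : f = f ∧ fs.take j = ss.take j := by simpa using h1
              exact h1'.2
            · simpa using h2
      · have hstep : oneChangeGapLoop (f :: fs) (s :: ss) 0 = oneChangeGapLoop (fs.drop 1) ss 1 := by
          simp [oneChangeGapLoop, hfs]
        rw [hstep, gap1_char (fs.drop 1) ss (by simp; omega)]
        constructor
        · intro hd
          exact ⟨0, by simp, by simp, by simpa using hd⟩
        · rintro ⟨k, hk, h1, h2⟩
          cases k with
          | zero => simpa using h2
          | succ j =>
            have h1' : f = s ∧ fs.take j = ss.take j := by simpa using h1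
            exact absurd h1'.1 hfs

theorem lcp_char (a : List Char) : ∀ b : List Char, a.length = b.length + 1 →
    (((lcpRest a b).1.drop 1 = (lcpRest a b).2) ↔
      ∃ k ∈ List.range (b.length + 1), a.take k = b.take k ∧ a.drop (k + 1) = b.drop k) := by
  induction a with
  | nil => intro b h; simp at h
  | cons x xs ih =>
    intro b h
    cases b with
    | nil =>
      have hxs : xs = [] := by simpa using h
      subst hxs
      simp [lcpRest]
    | cons y ys =>
      have hlen : xs.length = ys.length + 1 := by simpa using h
      by_cases hxy : x = y
      · subst hxy
        rw [show lcpRest (x :: xs) (x :: ys) = lcpRest xs ys by simp [lcpRest], ih ys hlen]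
        constructor
        · rintro ⟨k, hk, h1, h2⟩
          refine ⟨k + 1, ?_, ?_, ?_⟩
          · simp at hk ⊢; omega
          · simpa using h1
          · simpa using h2
        · rintro ⟨k, hk, h1, h2⟩
          cases k with
          | zero =>
            have h2' : xs = x :: ys := by simpa using h2
            refine ⟨0, by simp, by simp, by simp [h2']⟩
          | succ j =>
            refine ⟨j, ?_, ?_, ?_⟩
            · simp at hk ⊢; omega
            · have h1' : x = x ∧ xs.take j = ys.take j := by simpa using h1
              exact h1'.2
            · simpa using h2
      · rw [show lcpRest (x :: xs) (y :: ys) = (x :: xs, y :: ys) by simp [lcpRest, hxy]]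
        constructor
        · intro hd
          exact ⟨0, by simp, by simp, by simpa using hd⟩
        · rintro ⟨k, hk, h1, h2⟩
          cases k with
          | zero => simpa using h2
          | succ j =>
            have h1' : x = y ∧ xs.take j = ys.take j := by simpa using h1
            exact absurd h1'.1 hxy

theorem oneChange_iff (u t : List Char) : oneChange u t = true ↔ okd 1 u t := by
  by_cases he : u = t
  · subst he
    constructor
    · intro _
      exact Or.inl ⟨rfl, ⟨u.length, by simp, rfl, by simp⟩⟩  -- cf 1 1 with u = t
    · intro _; simp [oneChange]
  · by_cases hl : u.length = t.length
    · have h0 : oneChange u t = oneChangeEqLoop u t 0 := by simp [oneChange, he, hl]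
      rw [h0, ((oce_char u) t).1, sub_iff u t hl]
      unfold okd cf
      constructor
      · intro hx; exact Or.inl ⟨by omega, hx⟩
      · rintro (⟨_, hx⟩ | ⟨hlen, _⟩ | ⟨hlen, _⟩)
        · exact hx
        · omega
        · omega
    · by_cases hgt : u.length < t.length
      · by_cases h1 : t.length = u.length + 1
        · have h0 : oneChange u t = oneChangeGapLoop t u 0 := by
            simp [oneChange, he, h1]
          rw [h0, gap0_char t u h1]
          unfold okd cf
          constructor
          · intro hx; exact Or.inr (Or.inr ⟨by omega, hx⟩)
          · rintro (⟨hlen, _⟩ | ⟨hlen, _⟩ | ⟨_, hx⟩)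
            · omega
            · omega
            · exact hx
        · have h0 : oneChange u t = false := by simp [oneChange, he, hl, hgt, h1]
          rw [h0]
          unfold okd cf
          constructor
          · simp
          · rintro (⟨hlen, _⟩ | ⟨hlen, _⟩ | ⟨hlen, _⟩) <;> omega
      · by_cases h1 : u.length = t.length + 1
        · have h0 : oneChange u t = oneChangeGapLoop u t 0 := by
            simp [oneChange, he, h1]
          rw [h0, gap0_char u t h1]
          unfold okd cf
          constructor
          · intro hx; exact Or.inr (Or.inl ⟨by omega, hx⟩)
          · rintro (⟨hlen, _⟩ | ⟨_, hx⟩ | ⟨hlen, _⟩)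
            · omega
            · exact hx
            · omega
        · have h0 : oneChange u t = false := by simp [oneChange, he, hl, hgt, h1]
          rw [h0]
          unfold okd cf
          constructor
          · simp
          · rintro (⟨hlen, _⟩ | ⟨hlen, _⟩ | ⟨hlen, _⟩) <;> omega

theorem cat_take (x y : List Char) (k : Nat) (h : x.length = k) : (x ++ y).take k = x := by rw [← h]; exact List.take_left

theorem cat_drop (x y : List Char) (k j : Nat) (h : x.length = k) : (x ++ y).drop (k + j) = y.drop j := by
  subst h; rw [List.drop_append]; simp

theorem er (l : List Char) (k : Nat) : l.eraseIdx k = l.take k ++ l.drop (k + 1) :=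
  List.eraseIdx_eq_take_drop_succ l k

theorem er2 (u : List Char) (k : Nat) (h : k + 2 ≤ u.length) :
    (u.eraseIdx k).eraseIdx k = u.take k ++ u.drop (k + 2) := by
  have hk : (u.take k).length = k := by simp; omega
  rw [er, er, cat_take _ _ _ hk, show k + 1 = k + 1 from rfl, cat_drop _ _ _ 1 hk, List.drop_drop]

theorem cat_eq (x1 y1 x2 y2 : List Char) (h : x1.length = x2.length) :
    x1 ++ y1 = x2 ++ y2 ↔ (x1 = x2 ∧ y1 = y2) := by
  constructor
  · intro h2; exact List.append_inj h2 h
  · rintro ⟨rfl, rfl⟩; rfl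

theorem take_drop_id (l : List Char) (k : Nat) : l.take k ++ l.drop k = l := List.take_append_drop k l

theorem ok1_iff (u t : List Char) : ok1 u t ↔ okd 0 u t := by
  unfold ok1 okd cf
  simp only [List.mem_range]
  constructor
  · rintro ⟨k, hk, h | h | h⟩
    · by_cases hku : k < u.length
      · have hlen : t.length = u.length - 1 := by
          have := congrArg List.length h
          rw [List.length_eraseIdx] at this; simp [hku] at this; omega
        rw [er] at h
        have h' : u.take k ++ u.drop (k + 1) = t.take k ++ t.drop k := by
          rw [take_drop_id]; exact h
        have hsp := (cat_eq _ _ _ _ (by simp; omega)).mp h'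
        exact Or.inr (Or.inl ⟨by omega, k, by omega, hsp.1, by simpa using hsp.2⟩)
      · rw [List.eraseIdx_of_length_le (by omega)] at h
        subst h
        exact Or.inl ⟨rfl, u.length, by omega, rfl, by simp⟩
    · by_cases hkt : k < t.length
      · have hlen : u.length = t.length - 1 := by
          have := congrArg List.length h
          rw [List.length_eraseIdx] at this; simp [hkt] at this; omega
        rw [er] at h
        have h' : t.take k ++ t.drop (k + 1) = u.take k ++ u.drop k := by
          rw [take_drop_id]; exact h.symm
        have hsp := (cat_eq _ _ _ _ (by simp; omega)).mp h'
        exact Or.inr (Or.inr ⟨by omega, k, by omega, hsp.1, by simpa using hsp.2⟩)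
      · rw [List.eraseIdx_of_length_le (by omega)] at h
        subst h
        exact Or.inl ⟨rfl, u.length, by omega, rfl, by simp⟩
    · by_cases hku : k < u.length
      · by_cases hkt : k < t.length
        · have hlen : u.length = t.length := by
            have := congrArg List.length h
            rw [List.length_eraseIdx, List.length_eraseIdx] at this
            simp [hku, hkt] at this; omega
          rw [er, er] at h
          have hsp := (cat_eq _ _ _ _ (by simp; omega)).mp h
          exact Or.inl ⟨by omega, k, by omega, hsp.1, by simpa using hsp.2⟩
        · rw [show t.eraseIdx k = t from List.eraseIdx_of_length_le (by omega)] at h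
          have hlen : t.length = u.length - 1 := by
            have := congrArg List.length h
            rw [List.length_eraseIdx] at this; simp [hku] at this; omega
          rw [er] at h
          have h' : u.take k ++ u.drop (k + 1) = t.take k ++ t.drop k := by
            rw [take_drop_id]; exact h
          have hsp := (cat_eq _ _ _ _ (by simp; omega)).mp h'
          exact Or.inr (Or.inl ⟨by omega, k, by omega, hsp.1, by simpa using hsp.2⟩)
      · by_cases hkt : k < t.length
        · rw [show u.eraseIdx k = u from List.eraseIdx_of_length_le (by omega)] at h
          have hlen : u.length = t.length - 1 := by
            have := congrArg List.length h
            rw [List.length_eraseIdx] at this; simp [hkt] at this; omega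
          rw [er] at h
          have h' : t.take k ++ t.drop (k + 1) = u.take k ++ u.drop k := by
            rw [take_drop_id]; exact h.symm
          have hsp := (cat_eq _ _ _ _ (by simp; omega)).mp h'
          exact Or.inr (Or.inr ⟨by omega, k, by omega, hsp.1, by simpa using hsp.2⟩)
        · rw [show u.eraseIdx k = u from List.eraseIdx_of_length_le (by omega),
              show t.eraseIdx k = t from List.eraseIdx_of_length_le (by omega)] at h
          exact Or.inl ⟨by rw [h], t.length, by omega, by rw [h], by simp [h]⟩
  · rintro (⟨hlen, k, hk, h1, h2⟩ | ⟨hlen, k, hk, h1, h2⟩ | ⟨hlen, k, hk, h1, h2⟩)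
    · refine ⟨k, by omega, Or.inr (Or.inr ?_)⟩
      rw [er, er, h1, show u.drop (k + 1) = t.drop (k + 1) from by simpa using h2]
    · refine ⟨k, by omega, Or.inl ?_⟩
      rw [er, h1, show u.drop (k + 1) = t.drop k from by simpa using h2, take_drop_id]
    · refine ⟨k, hk, Or.inr (Or.inl ?_)⟩
      conv_lhs => rw [← take_drop_id u k]
      rw [er, ← h1, ← show t.drop (k + 1) = u.drop k from by simpa using h2]

theorem bad_to_okd (u t : List Char) : bad u t → okd 1 u t := by
  unfold bad okd cf
  simp only [List.mem_range]
  rintro ⟨k, hkt, h⟩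
  by_cases h2 : k + 2 ≤ u.length
  · rw [er2 _ _ h2, er] at h
    have hlen : u.length = t.length + 1 := by
      have := congrArg List.length h; simp at this; omega
    have hsp := (cat_eq _ _ _ _ (by simp; omega)).mp h
    exact Or.inr (Or.inl ⟨by omega, k, by omega, hsp.1, by simpa using hsp.2⟩)
  · by_cases hku : k < u.length
    · have hno : (u.eraseIdx k).eraseIdx k = u.eraseIdx k :=
        List.eraseIdx_of_length_le (by rw [List.length_eraseIdx]; simp [hku]; omega)
      rw [hno, er, er] at h
      have hlen : u.length = t.length := by
        have := congrArg List.length h; simp at this; omega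
      have hsp := (cat_eq _ _ _ _ (by simp; omega)).mp h
      exact Or.inl ⟨by omega, k, by omega, hsp.1, by simpa using hsp.2⟩
    · rw [show u.eraseIdx k = u from List.eraseIdx_of_length_le (by omega),
          show u.eraseIdx k = u from List.eraseIdx_of_length_le (by omega), er] at h
      have hlen : u.length = t.length - 1 := by
        have := congrArg List.length h; simp at this; omega
      have h' : t.take k ++ t.drop (k + 1) = u.take k ++ u.drop k := by
        rw [take_drop_id]; exact h.symm
      have hsp := (cat_eq _ _ _ _ (by simp; omega)).mp h'
      refine Or.inr (Or.inr ⟨by omega, k, by omega, hsp.1, ?_⟩)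
      have h3 := congrArg (List.drop 1) hsp.2
      simp only [List.drop_drop] at h3
      convert h3 using 2

theorem okd1_symm (u t : List Char) : okd 1 t u → okd 1 u t := by
  unfold okd cf
  simp only [List.mem_range]
  rintro (⟨hlen, k, hk, h1, h2⟩ | h | h)
  · exact Or.inl ⟨by omega, k, by omega, h1.symm, h2.symm⟩
  · exact Or.inr (Or.inr h)
  · exact Or.inr (Or.inl h)

theorem diff_bad (u t : List Char) : okd 1 u t → okd 0 u t ∨ bad u t ∨ bad t u := by
  unfold okd cf bad
  simp only [List.mem_range]
  rintro (h | ⟨hlen, k, hk, h1, h2⟩ | ⟨hlen, k, hk, h1, h2⟩)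
  · exact Or.inl (Or.inl h)
  · by_cases hkt : k < t.length
    · refine Or.inr (Or.inl ⟨k, hkt, ?_⟩)
      rw [er2 _ _ (by omega), er, h1, show u.drop (k + 2) = t.drop (k + 1) from by simpa using h2]
    · refine Or.inl (Or.inr (Or.inl ⟨by omega, t.length, by omega, ?_, ?_⟩))
      · rw [show t.length = k from by omega]; exact h1
      · rw [List.drop_eq_nil_of_le (by omega), List.drop_eq_nil_of_le (by omega)]
  · by_cases hku : k < u.length
    · refine Or.inr (Or.inr ⟨k, hku, ?_⟩)
      rw [er2 _ _ (by omega), er, h1, show t.drop (k + 2) = u.drop (k + 1) from by simpa using h2]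
    · refine Or.inl (Or.inr (Or.inr ⟨by omega, u.length, by omega, ?_, ?_⟩))
      · rw [show u.length = k from by omega]; exact h1
      · rw [List.drop_eq_nil_of_le (by omega), List.drop_eq_nil_of_le (by omega)]

theorem foldl_count (l : List (Char × Char)) (n : Nat) :
    l.foldl (fun acc p => acc + (if p.1 ≠ p.2 then 1 else 0)) n
      = n + l.countP (fun p => decide (p.1 ≠ p.2)) := by
  induction l generalizing n with
  | nil => simp
  | cons x xs ih =>
    rw [List.foldl_cons, List.countP_cons, ih]
    by_cases h : x.1 = x.2 <;> simp [h]
    omega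

theorem within1_iff (u t : List Char) : within1 u t = true ↔ okd 0 u t := by
  by_cases hl : u.length = t.length
  · have h0 : within1 u t
        = decide ((u.zip t).foldl (fun acc p => acc + (if p.1 ≠ p.2 then 1 else 0)) 0 ≤ 1) := by
      simp [within1, hl]
    rw [h0, decide_eq_true_eq, foldl_count, Nat.zero_add, sub_iff u t hl]
    unfold okd cf
    constructor
    · intro hx; exact Or.inl ⟨by omega, hx⟩
    · rintro (⟨_, hx⟩ | ⟨hlen, _⟩ | ⟨hlen, _⟩)
      · exact hx
      · omega
      · omega
  · by_cases hd : ((u.length : Int) - t.length).natAbs = 1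
    · by_cases hlt : u.length < t.length
      · have h1 : t.length = u.length + 1 := by omega
        have h0 : within1 u t = decide (((lcpRest t u).1.drop 1) = (lcpRest t u).2) := by
          simp [within1, hl, hd, hlt]
        rw [h0, decide_eq_true_eq, lcp_char t u h1]
        unfold okd cf
        constructor
        · intro hx; exact Or.inr (Or.inr ⟨by omega, hx⟩)
        · rintro (⟨hlen, _⟩ | ⟨hlen, _⟩ | ⟨_, hx⟩)
          · omega
          · omega
          · exact hx
      · have h1 : u.length = t.length + 1 := by omega
        have h0 : within1 u t = decide (((lcpRest u t).1.drop 1) = (lcpRest u t).2) := by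
          simp [within1, hl, hd, hlt]
        rw [h0, decide_eq_true_eq, lcp_char u t h1]
        unfold okd cf
        constructor
        · intro hx; exact Or.inr (Or.inl ⟨by omega, hx⟩)
        · rintro (⟨hlen, _⟩ | ⟨_, hx⟩ | ⟨hlen, _⟩)
          · omega
          · exact hx
          · omega
    · have h0 : within1 u t = false := by simp [within1, hl, hd]
      rw [h0]
      unfold okd cf
      constructor
      · simp
      · rintro (⟨hlen, _⟩ | ⟨hlen, _⟩ | ⟨hlen, _⟩) <;> omega

theorem bOK_imp_aOK (u t : List Char) : okd 0 u t → okd 1 u t := by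
  unfold okd cf
  rintro (h | ⟨hlen, k, hk, h1, h2⟩ | ⟨hlen, k, hk, h1, h2⟩)
  · exact Or.inl h
  · refine Or.inr (Or.inl ⟨by omega, k, hk, h1, ?_⟩)
    have h3 := congrArg (List.drop 1) h2
    simp only [List.drop_drop] at h3
    convert h3 using 2
  · refine Or.inr (Or.inr ⟨by omega, k, hk, h1, ?_⟩)
    have h3 := congrArg (List.drop 1) h2
    simp only [List.drop_drop] at h3
    convert h3 using 2

theorem has_chili_eq_any : ∀ l : List String,
    has_chili l = l.any (fun tok =>
      oneChange tok.toList "chili".toList || oneChange tok.toList "chilies".toList)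
  | [] => rfl
  | tok :: rest => by
    rw [show has_chili (tok :: rest) =
        (if oneChange tok.toList "chili".toList || oneChange tok.toList "chilies".toList then true
         else has_chili rest) from rfl, List.any_cons, has_chili_eq_any rest]
    by_cases hx : (oneChange tok.toList "chili".toList || oneChange tok.toList "chilies".toList) = true <;>
      simp_all

theorem has_chili_iff (l : List String) :
    has_chili l = true ↔ ∃ tok ∈ l, okd 1 tok.toList "chili".toList ∨ okd 1 tok.toList "chilies".toList := by
  rw [has_chili_eq_any, List.any_eq_true]
  simp only [Bool.or_eq_true, oneChange_iff]

theorem has_chili_alt_iff (l : List String) :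
    has_chili_alt l = true ↔ ∃ tok ∈ l, okd 0 tok.toList "chili".toList ∨ okd 0 tok.toList "chilies".toList := by
  rw [has_chili_alt, List.any_eq_true]
  simp only [Bool.or_eq_true, within1_iff]

-- ===== VERDICT (by name: the statement is the Claim_ definition above) =====

-- plumbing from tgts membership to the two fixed targets
theorem tgts_elim {P : String → Prop} : (∃ t ∈ tgts, P t) ↔ P "chili" ∨ P "chilies" := by
  simp [tgts]

-- ===== VERDICT (by name: the statement is the Claim_ definition above) =====
theorem has_chili_spec : Claim_unchanged_has_chili := by
  intro l _ hND
  by_cases hB : has_chili_alt l = true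
  · rw [hB]
    obtain ⟨u, hm, hu⟩ := (has_chili_alt_iff l).mp hB
    exact (has_chili_iff l).mpr ⟨u, hm, hu.imp (bOK_imp_aOK _ _) (bOK_imp_aOK _ _)⟩
  · have hBf : has_chili_alt l = false := by
      cases h : has_chili_alt l with
      | false => rfl
      | true => exact absurd h hB
    rw [hBf]
    cases hA : has_chili l
    · rfl
    · exfalso
      apply hND
      have hnok : ¬ ∃ u ∈ l, ∃ t ∈ tgts, ok1 u.toList t.toList := by
        rintro ⟨u, hm, t, ht, hok⟩
        rcases (tgts_elim (P := fun t => ok1 u.toList t.toList)).mp ⟨t, ht, hok⟩ with h | h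
        · exact hB ((has_chili_alt_iff l).mpr ⟨u, hm, Or.inl ((ok1_iff _ _).mp h)⟩)
        · exact hB ((has_chili_alt_iff l).mpr ⟨u, hm, Or.inr ((ok1_iff _ _).mp h)⟩)
      refine ⟨?_, hnok⟩
      obtain ⟨u, hm, hu⟩ := (has_chili_iff l).mp hA
      rcases hu with h | h
      · rcases diff_bad _ _ h with h0 | hb | hb
        · exact absurd ((has_chili_alt_iff l).mpr ⟨u, hm, Or.inl h0⟩) hB
        · exact ⟨u, hm, "chili", by simp [tgts], Or.inl hb⟩
        · exact ⟨u, hm, "chili", by simp [tgts], Or.inr hb⟩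
      · rcases diff_bad _ _ h with h0 | hb | hb
        · exact absurd ((has_chili_alt_iff l).mpr ⟨u, hm, Or.inr h0⟩) hB
        · exact ⟨u, hm, "chilies", by simp [tgts], Or.inl hb⟩
        · exact ⟨u, hm, "chilies", by simp [tgts], Or.inr hb⟩

theorem has_chili_changed : Claim_changed_has_chili := by
  unfold Claim_changed_has_chili; decide

theorem has_chili_tight : Claim_exact_has_chili := by
  intro l _ hD
  obtain ⟨⟨u, hm, t, ht, hbad⟩, hnok⟩ := hD
  have ht' : t = "chili" ∨ t = "chilies" := by simpa [tgts] using ht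
  have hok1 : okd 1 u.toList t.toList := by
    rcases hbad with h | h
    · exact bad_to_okd _ _ h
    · exact okd1_symm _ _ (bad_to_okd _ _ h)
  have hA : has_chili l = true := by
    refine (has_chili_iff l).mpr ⟨u, hm, ?_⟩
    rcases ht' with rfl | rfl
    · exact Or.inl hok1
    · exact Or.inr hok1
  have hBf : has_chili_alt l = false := by
    cases h : has_chili_alt l
    · rfl
    · exfalso
      obtain ⟨v, hv, hok⟩ := (has_chili_alt_iff l).mp h
      rcases hok with h0 | h0
      · exact hnok ⟨v, hv, "chili", by simp [tgts], (ok1_iff _ _).mpr h0⟩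
      · exact hnok ⟨v, hv, "chilies", by simp [tgts], (ok1_iff _ _).mpr h0⟩
  rw [hA, hBf]; simp
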